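-- pv_equiv track=rewrite | github.com/jack787/CS61A | Lab/lab01/parsons_probs/digit_pos_match.py | digit_pos_match
-- ===== SOURCE A (Python) =====
-- def digit_pos_match(n, k):
--     """
--     >>> digit_pos_match(980, 0) # .Case 1
--     True
--     >>> digit_pos_match(980, 2) # .Case 2
--     False
--     >>> digit_pos_match(98276, 2) # .Case 3
--     True
--     >>> digit_pos_match(98276, 3) # .Case 4
--     False
--     """
--     "*** YOUR CODE HERE ***"
--     if n == 0 and k == 0:
--         return True
--     cnt = 0
--     while n:
--         if k == cnt and n % 10 == k:
--             return True
--         cnt += 1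
--         n //= 10
--     return False
-- ===== SOURCE B (Python) =====
-- def digit_pos_match(n, k):
--     # a decimal digit is between 0 and 9, so no other k can ever match
--     if k < 0 or k > 9:
--         return False
--     return n // 10 ** k % 10 == k
-- ===== Notes on version B (the rewrite author's own statement) =====
-- stated objective: simpler
-- what changed: Replaces the digit-peeling while-loop (dividing n by 10 with a counter) by a single closed-form expression (n // 10**k) % 10 == k, guarded by k in 0..9 since a decimal digit can never equal any other k.
import Mathlib
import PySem

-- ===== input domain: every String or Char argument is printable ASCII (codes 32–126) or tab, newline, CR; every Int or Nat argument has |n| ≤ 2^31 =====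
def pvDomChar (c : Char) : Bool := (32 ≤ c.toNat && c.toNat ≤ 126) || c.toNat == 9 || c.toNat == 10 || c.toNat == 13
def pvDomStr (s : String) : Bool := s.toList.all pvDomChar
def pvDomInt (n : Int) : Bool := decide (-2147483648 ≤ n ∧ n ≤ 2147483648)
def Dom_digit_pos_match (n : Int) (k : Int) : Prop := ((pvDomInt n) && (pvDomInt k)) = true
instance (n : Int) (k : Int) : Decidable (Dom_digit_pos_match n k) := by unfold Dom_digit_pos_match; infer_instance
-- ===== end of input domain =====

-- B replaces A's digit-peeling while-loop by the closed form (n // 10**k) % 10 == k (objective: simpler).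
-- A never terminates for n < 0, so Pre_ restricts to 0 ≤ n.

-- ===== PORT A =====
-- A's while-loop; for n ≤ 0 Python's `while n` is false only at n = 0 (n < 0 diverges in
-- Python and is outside Pre_; the port exits there so it is total).
def pvLoopA (n : Int) (cnt : Int) (k : Int) : Bool :=
  if _h : n ≤ 0 then false
  else if k = cnt ∧ PySem.Int.mod n 10 = k then true
  else pvLoopA (PySem.Int.floordiv n 10) (cnt + 1) k
termination_by n.toNat
decreasing_by
  rename_i _h
  have h10 : (0:Int) < 10 := by norm_num
  rw [PySem.Int.floordiv_eq_ediv_of_pos h10]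
  omega

def digit_pos_match (n : Int) (k : Int) : Bool :=
  if n = 0 ∧ k = 0 then true
  else pvLoopA n 0 k

-- ===== PORT B =====
-- a decimal digit is between 0 and 9, so no k outside 0..9 can ever match
def digit_pos_match_alt (n : Int) (k : Int) : Bool :=
  if k < 0 ∨ 9 < k then false
  else decide (PySem.Int.mod (PySem.Int.floordiv n (10 ^ k.toNat)) 10 = k)

-- ===== PRECONDITION & SPEC =====
-- Pre_ excludes n < 0, on which A's while-loop never terminates (n //= 10 stalls at -1).
def Pre_digit_pos_match (n : Int) (k : Int) : Prop := 0 ≤ n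
instance (n : Int) (k : Int) : Decidable (Pre_digit_pos_match n k) := by unfold Pre_digit_pos_match; infer_instance
def pvWitness_digit_pos_match : Int × Int := (980, 0)
def Spec_digit_pos_match (n : Int) (k : Int) (out : Bool) : Prop := out = digit_pos_match_alt n k
instance (n : Int) (k : Int) (out : Bool) : Decidable (Spec_digit_pos_match n k out) := by unfold Spec_digit_pos_match; infer_instance

-- ===== CLAIM (what is proved, stated in full; the proofs are below) =====
def Claim_equal_digit_pos_match : Prop := ∀ (n : Int) (k : Int), Dom_digit_pos_match n k → Pre_digit_pos_match n k → Spec_digit_pos_match n k (digit_pos_match n k)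

-- ===== LEMMAS AND PROOFS =====

-- Once the counter has passed k, the loop can only return false.
theorem pvLoopA_false (m : Nat) (n cnt k : Int) (hm : n.toNat = m) (hk : k < cnt) :
    pvLoopA n cnt k = false := by
  induction m using Nat.strong_induction_on generalizing n cnt with
  | _ m ih =>
    rw [pvLoopA]
    split
    · rfl
    · rename_i _h
      have h10 : (0:Int) < 10 := by norm_num
      rw [if_neg (by omega)]
      refine ih (PySem.Int.floordiv n 10).toNat ?_ _ _ rfl (by omega)
      rw [PySem.Int.floordiv_eq_ediv_of_pos h10]
      omega

-- k larger than any decimal digit: the loop's match `n % 10 == k` can never fire.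
theorem pvLoopA_false_big (m : Nat) (n cnt k : Int) (hm : n.toNat = m) (hn : 0 ≤ n)
    (hk : 9 < k) : pvLoopA n cnt k = false := by
  induction m using Nat.strong_induction_on generalizing n cnt with
  | _ m ih =>
    rw [pvLoopA]
    split
    · rfl
    · rename_i h
      have h10 : (0:Int) < 10 := by norm_num
      have hmod : PySem.Int.mod n 10 < 10 := by
        rw [PySem.Int.mod_eq_emod_of_pos h10]
        exact Int.emod_lt_of_pos n h10
      rw [if_neg (by omega)]
      have hdiv : 0 ≤ PySem.Int.floordiv n 10 := by
        rw [PySem.Int.floordiv_eq_ediv_of_pos h10]; positivity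
      refine ih (PySem.Int.floordiv n 10).toNat ?_ _ _ rfl hdiv
      rw [PySem.Int.floordiv_eq_ediv_of_pos h10]
      omega

-- Loop characterisation: with 0 ≤ cnt ≤ k, the loop decides the closed-form digit test
-- (false once n has been exhausted).
theorem pvLoopA_eq (m : Nat) (n cnt k : Int) (hm : n.toNat = m) (hn : 0 ≤ n)
    (h0 : 0 ≤ cnt) (hck : cnt ≤ k) :
    pvLoopA n cnt k = decide (n ≠ 0 ∧ n / 10 ^ (k - cnt).toNat % 10 = k) := by
  induction m using Nat.strong_induction_on generalizing n cnt with
  | _ m ih =>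
    have h10 : (0:Int) < 10 := by norm_num
    rw [pvLoopA]
    simp only [PySem.Int.mod_eq_emod_of_pos h10, PySem.Int.floordiv_eq_ediv_of_pos h10]
    split
    · rename_i _h
      have hn0 : n = 0 := by omega
      simp [hn0]
    · rename_i _h
      have hpos : 0 < n := by omega
      have hdiv : 0 ≤ n / 10 := by positivity
      have hlt : (n / 10).toNat < m := by omega
      by_cases hkc : k = cnt
      · subst hkc
        simp only [sub_self, Int.toNat_zero, pow_zero, Int.ediv_one]
        split
        · rename_i hc
          simp [hc.2, hpos.ne']
        · rename_i hc
          simp only [true_and] at hc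
          rw [pvLoopA_false (n / 10).toNat (n / 10) (k + 1) k rfl (by omega)]
          simp [hc]
      · rw [if_neg (fun hc => hkc hc.1)]
        rw [ih _ hlt _ _ rfl hdiv (by omega) (by omega)]
        have hexp : (k - cnt).toNat = (k - (cnt + 1)).toNat + 1 := by omega
        have hcomp : n / 10 / 10 ^ (k - (cnt + 1)).toNat = n / 10 ^ (k - cnt).toNat := by
          rw [hexp, pow_succ', Int.ediv_ediv_of_nonneg (by norm_num : (0:Int) ≤ 10)]
        rw [hcomp]
        -- n ≠ 0 vs n/10 ≠ 0: when 0 < n < 10 both sides are false since k ≥ cnt + 1 ≥ 1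
        by_cases hsmall : n / 10 = 0
        · have hkpos : 1 ≤ k := by omega
          have hdig0 : n / 10 ^ (k - cnt).toNat = 0 := by
            have hge : (10:Int) ≤ 10 ^ (k - cnt).toNat := by
              calc (10:Int) = 10 ^ 1 := by norm_num
              _ ≤ 10 ^ (k - cnt).toNat := by
                  apply pow_le_pow_right₀ (by norm_num); omega
            exact Int.ediv_eq_zero_of_lt (by omega) (by omega)
          rw [hdig0]
          simp only [hsmall, Int.zero_emod]
          simp only [ne_eq, not_true_eq_false, false_and, decide_false]
          have hk0 : ¬((0:Int) = k) := by omega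
          simp [hk0]
        · simp [hsmall, hpos.ne']

-- ===== VERDICT (by name: the statement is the Claim_ definition above) =====
theorem digit_pos_match_spec : Claim_equal_digit_pos_match := by
  intro n k _hdom hpre
  unfold Spec_digit_pos_match digit_pos_match digit_pos_match_alt
  have hn : (0:Int) ≤ n := hpre
  have hp : (0:Int) < 10 ^ k.toNat := by positivity
  by_cases hk : k < 0 ∨ 9 < k
  · rw [if_pos hk, if_neg (by omega)]
    rcases hk with hk | hk
    · exact pvLoopA_false n.toNat n 0 k rfl (by omega)
    · exact pvLoopA_false_big n.toNat n 0 k rfl hn hk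
  · rw [if_neg hk]
    push_neg at hk
    obtain ⟨hk, _⟩ := hk
    by_cases hz : n = 0 ∧ k = 0
    · obtain ⟨h1, h2⟩ := hz
      subst h1; subst h2
      rw [if_pos ⟨rfl, rfl⟩]
      rw [PySem.Int.floordiv_eq_ediv_of_pos hp,
          PySem.Int.mod_eq_emod_of_pos (by norm_num : (0:Int) < 10)]
      simp
    · rw [if_neg hz]
      rw [pvLoopA_eq n.toNat n 0 k rfl hn le_rfl (by omega)]
      rw [PySem.Int.floordiv_eq_ediv_of_pos hp,
          PySem.Int.mod_eq_emod_of_pos (by norm_num : (0:Int) < 10)]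
      by_cases hn0 : n = 0
      · subst hn0
        have hk0 : k ≠ 0 := fun h2 => hz ⟨rfl, h2⟩
        have : ¬((0:Int) / 10 ^ k.toNat % 10 = k) := by
          rw [Int.zero_ediv, Int.zero_emod]; omega
        simp only [ne_eq, not_true_eq_false, false_and, decide_false, Int.zero_ediv,
          Int.zero_emod]
        simp only [show ¬((0:Int) = k) from fun h2 => hk0 h2.symm, decide_false]
      · rw [show (k - 0).toNat = k.toNat by omega]
        simp [hn0]
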